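-- pv_equiv track=rewrite | github.com/KyleSpicer/advent_of_code | 2023/day1/day1.py | p1_get_value
-- ===== SOURCE A (Python) =====
-- def p1_get_value(line):
--     value_str = ""
--
--     # forward traversal to find first number
--     for letter in line:
--         if letter.isdigit():
--             value_str = letter
--             break
--
--     # reverse traversal to find last number
--     for letter in line[::-1]:
--         if letter.isdigit():
--             value_str = f"{value_str}{letter}"
--             break
--
--     return int(value_str)
-- ===== SOURCE B (Python) =====
-- def p1_get_value(line):
--     first = last = ""
--     for c in line:
--         if c.isdigit():
--             if not first:
--                 first = c
--             last = c
--     return int(first + last)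
-- ===== Notes on version B (the rewrite author's own statement) =====
-- stated objective: simpler
-- what changed: B replaces A's two scans (forward loop with break plus a reversed-slice loop with break) by one forward pass keeping first/last digit accumulators.
import Mathlib
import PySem

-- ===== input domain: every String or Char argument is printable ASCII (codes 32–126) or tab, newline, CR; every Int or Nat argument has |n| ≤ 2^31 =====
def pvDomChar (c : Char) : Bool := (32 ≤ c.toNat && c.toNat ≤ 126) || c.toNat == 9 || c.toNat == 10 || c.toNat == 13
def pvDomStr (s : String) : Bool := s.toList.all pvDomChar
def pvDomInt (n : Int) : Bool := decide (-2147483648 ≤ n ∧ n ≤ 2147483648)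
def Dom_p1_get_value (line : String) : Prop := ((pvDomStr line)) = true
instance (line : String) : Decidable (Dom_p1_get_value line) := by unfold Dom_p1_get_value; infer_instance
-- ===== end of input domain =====

-- B makes one forward pass keeping first/last digit accumulators instead of A's
-- forward scan with break plus reversed-slice second scan; same value everywhere both return.

-- ===== PORT A =====
-- forward traversal: first digit, with break
def p1Loop1 : List Char → String → String
  | [], v => v
  | c :: cs, v => if PySem.Chars.isdigit c then String.ofList [c] else p1Loop1 cs v

-- reverse traversal: first digit of the reversed string, with break
def p1Loop2 : List Char → String → String
  | [], v => v
  | c :: cs, v => if PySem.Chars.isdigit c then v ++ String.ofList [c] else p1Loop2 cs v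

def p1_get_value (line : String) : Int :=
  let v1 := p1Loop1 line.toList ""
  let rev := (PySem.Str.slice? line none none (-1)).getD ""   -- line[::-1]; step -1 ≠ 0 so never none
  let v2 := p1Loop2 rev.toList v1
  (PySem.Int.ofStr? v2).getD 0   -- int(value_str); none (ValueError) excluded by Pre_

-- ===== PORT B =====
def bStep (st : String × String) (c : Char) : String × String :=
  if PySem.Chars.isdigit c then
    ((if st.1 = "" then String.ofList [c] else st.1), String.ofList [c])
  else st

def p1_get_value_alt (line : String) : Int :=
  let st := line.toList.foldl bStep ("", "")
  (PySem.Int.ofStr? (st.1 ++ st.2)).getD 0   -- int(first + last); none excluded by Pre_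

-- ===== PRECONDITION & SPEC =====
-- Pre_ excludes exactly the digit-free lines, on which A (and B) raise ValueError.
def Pre_p1_get_value (line : String) : Prop := line.toList.any PySem.Chars.isdigit = true
instance (line : String) : Decidable (Pre_p1_get_value line) := by unfold Pre_p1_get_value; infer_instance
def pvWitness_p1_get_value : String := "a1b2"

def Spec_p1_get_value (line : String) (out : Int) : Prop := out = p1_get_value_alt line
instance (line : String) (out : Int) : Decidable (Spec_p1_get_value line out) := by unfold Spec_p1_get_value; infer_instance

-- ===== CLAIM (what is proved, stated in full; the proofs are below) =====
def Claim_equal_p1_get_value : Prop := ∀ (line : String), Dom_p1_get_value line → Pre_p1_get_value line → Spec_p1_get_value line (p1_get_value line)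

-- ===== LEMMAS AND PROOFS =====
theorem loop1_eq (l : List Char) (v : String) :
    p1Loop1 l v = ((l.filter PySem.Chars.isdigit).head?.elim v (fun d => String.ofList [d])) := by
  induction l with
  | nil => rfl
  | cons c cs ih =>
    by_cases h : PySem.Chars.isdigit c = true <;> simp [p1Loop1, h, ih]

theorem loop2_eq (l : List Char) (v : String) :
    p1Loop2 l v = ((l.filter PySem.Chars.isdigit).head?.elim v (fun d => v ++ String.ofList [d])) := by
  induction l with
  | nil => rfl
  | cons c cs ih =>
    by_cases h : PySem.Chars.isdigit c = true <;> simp [p1Loop2, h, ih]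

theorem mk_ne_empty (c : Char) : String.ofList [c] ≠ "" := by
  intro h
  have := congrArg String.toList h
  simp at this

theorem fold_ne (l : List Char) (first last : String) (h : first ≠ "") :
    l.foldl bStep (first, last) =
      (first, ((l.filter PySem.Chars.isdigit).getLast?.elim last (fun d => String.ofList [d]))) := by
  induction l generalizing last with
  | nil => rfl
  | cons c cs ih =>
    by_cases hc : PySem.Chars.isdigit c = true
    · simp only [List.foldl_cons, bStep, hc, if_true, if_neg h, List.filter_cons, ih,
        List.getLast?_cons]
      cases (cs.filter PySem.Chars.isdigit).getLast? <;> simp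
    · simp [List.foldl_cons, bStep, hc, ih]

theorem fold_empty (l : List Char) :
    l.foldl bStep ("", "") =
      ((l.filter PySem.Chars.isdigit).head?.elim "" (fun d => String.ofList [d]),
       ((l.filter PySem.Chars.isdigit).getLast?.elim "" (fun d => String.ofList [d]))) := by
  induction l with
  | nil => rfl
  | cons c cs ih =>
    by_cases hc : PySem.Chars.isdigit c = true
    · simp only [List.foldl_cons, bStep, hc, if_true, List.filter_cons]
      rw [fold_ne _ _ _ (mk_ne_empty c)]
      simp only [List.head?_cons, List.getLast?_cons, Option.elim_some]
      cases (cs.filter PySem.Chars.isdigit).getLast? <;> simp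
    · simp [List.foldl_cons, bStep, hc, ih]

-- ===== VERDICT (by name: the statement is the Claim_ definition above) =====
theorem p1_get_value_spec : Claim_equal_p1_get_value := by
  intro line _ hpre
  unfold Pre_p1_get_value at hpre
  unfold Spec_p1_get_value p1_get_value p1_get_value_alt
  have hne : line.toList.filter PySem.Chars.isdigit ≠ [] := by
    rw [List.any_eq_true] at hpre
    obtain ⟨c, hc, hdc⟩ := hpre
    exact List.ne_nil_of_mem (List.mem_filter.mpr ⟨hc, hdc⟩)
  obtain ⟨d, hfd⟩ : ∃ d, (line.toList.filter PySem.Chars.isdigit).head? = some d :=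
    ⟨_, List.head?_eq_some_head hne⟩
  obtain ⟨e, he⟩ : ∃ e, (line.toList.filter PySem.Chars.isdigit).getLast? = some e :=
    ⟨_, List.getLast?_eq_getLast_of_ne_nil hne⟩
  have hrev : (PySem.Str.slice? line none none (-1)).getD "" = String.ofList line.toList.reverse := by
    rw [PySem.Str.slice?_none_none_neg_one]; rfl
  simp only [hrev, loop1_eq, loop2_eq, fold_empty, String.toList_ofList,
    List.filter_reverse, List.head?_reverse, hfd, he, Option.elim_some]
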